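-- pv_equiv track=rewrite | github.com/rubtsovdmitry/python | level 1/7. Files, functios and modules/my_lib.py | true_date
-- ===== SOURCE A (Python) =====
-- def true_date(year, month, day):
--     dict_1 = {1: 31, 2: 28, 3: 31, 4: 30, 5: 31, 6: 30, 7: 31, 8: 31, 9: 30, 10: 31, 11: 30, 12: 31}                                                                # словарь для обычного года
--     dict_2 = {1: 31, 2: 29, 3: 31, 4: 30, 5: 31, 6: 30, 7: 31, 8: 31, 9: 30, 10: 31, 11: 30, 12: 31}                                                                # словарь для високосного года
--     if ((year % 4 == 0 and year % 100 != 0) or (year % 100 == 0 and year % 400 == 0)) and (month in dict_2) and (1 <= day <= dict_2[month]):                        # проверка даты, если год високосный (раньше такая задача встречалась, называется високосный год)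
--         flag = True                                                                                                                                                 # флаг, если год прошёл проверку на существование даты
--         number = 0                                                                                                                                                  # будем копить сюда порядковый номер дня в году
--         for a, b in dict_2.items():                                                                                                                                 # обойдем словарь в цикле и накопим порядковый номер пока будет удовлетворять условие
--             if a < month:
--                 number += b
--             elif a == month:
--                 number += day
--     elif (((year % 4 == 0 and year % 100 != 0) or (year % 100 == 0 and year % 400 == 0)) == False) and (month in dict_2) and (1 <= day <= dict_1[month]):           # повторение, только для другого словаря
--         flag = True
--         number = 0
--         for a, b in dict_1.items():
--             if a < month:
--                 number += b
--             elif a == month: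
--                 number += day
--     else:                                                                                                                                                           # этот блок, когда дата не прошла проверку, т.е. не существует
--         flag = False
--         number = 0
--     return (flag, number)                                                                                                                                           # возвращаем кортеж, первый элемент которого является флагом прошла дата проверку на существование или нет, а второй элемент это порядковый номер дня для этой даты в году.
-- ===== SOURCE B (Python) =====
-- _MDAYS = (31, 28, 31, 30, 31, 30, 31, 31, 30, 31, 30, 31)
-- _CUM = (0, 31, 59, 90, 120, 151, 181, 212, 243, 273, 304, 334)
--
--
-- def true_date(year, month, day):
--     leap = year % 4 == 0 and (year % 100 != 0 or year % 400 == 0)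
--     if 1 <= month <= 12:
--         limit = 29 if (leap and month == 2) else _MDAYS[month - 1]
--         if 1 <= day <= limit:
--             extra = 1 if (leap and month > 2) else 0
--             return (True, _CUM[month - 1] + extra + day)
--     return (False, 0)
-- ===== Notes on version B (the rewrite author's own statement) =====
-- stated objective: alternative
-- what changed: Replaces the two month-length dicts and the 12-step accumulation loop with a single leap-year boolean, a range check on the month, a month-length table lookup for the day bound, and a precomputed prefix-sum table plus a leap offset, so the day-of-year ordinal comes from one table lookup instead of a loop.
import Mathlib
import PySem

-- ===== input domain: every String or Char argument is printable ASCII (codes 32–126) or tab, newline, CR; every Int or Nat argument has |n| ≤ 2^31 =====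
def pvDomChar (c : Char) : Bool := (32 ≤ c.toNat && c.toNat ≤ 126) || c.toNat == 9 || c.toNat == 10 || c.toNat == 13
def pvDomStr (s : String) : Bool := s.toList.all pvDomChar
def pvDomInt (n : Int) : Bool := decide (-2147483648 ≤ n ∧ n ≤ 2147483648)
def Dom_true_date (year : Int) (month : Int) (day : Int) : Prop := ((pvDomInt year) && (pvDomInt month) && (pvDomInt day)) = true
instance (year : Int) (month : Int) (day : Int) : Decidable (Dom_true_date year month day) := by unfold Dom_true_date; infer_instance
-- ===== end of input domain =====

-- B replaces A's two month-length dicts and its 12-step accumulation loop with a leap flag, a range check and two table lookups (month length + prefix sum): a different decomposition of the same computation.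

-- ===== PORT A =====
-- the two month-length dict literals (named once; used verbatim in the port)
def pvD1 : List (Int × Int) := [(1,31),(2,28),(3,31),(4,30),(5,31),(6,30),(7,31),(8,31),(9,30),(10,31),(11,30),(12,31)]
def pvD2 : List (Int × Int) := [(1,31),(2,29),(3,31),(4,30),(5,31),(6,30),(7,31),(8,31),(9,30),(10,31),(11,30),(12,31)]

def true_date (year : Int) (month : Int) (day : Int) : Bool × Int :=
  let dict_1 : PySem.Dict Int Int := PySem.Dict.ofList pvD1
  let dict_2 : PySem.Dict Int Int := PySem.Dict.ofList pvD2
  -- dict_2[month] / dict_1[month] are guarded by 'month in dict_2', so getD 0 is exact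
  if ((PySem.Int.mod year 4 = 0 ∧ PySem.Int.mod year 100 ≠ 0) ∨ (PySem.Int.mod year 100 = 0 ∧ PySem.Int.mod year 400 = 0)) ∧
     dict_2.contains month = true ∧ (1 ≤ day ∧ day ≤ (dict_2.get? month).getD 0) then
    let number := dict_2.items.foldl (fun number ab =>
      if ab.1 < month then number + ab.2 else if ab.1 = month then number + day else number) 0
    (true, number)
  else if (¬ ((PySem.Int.mod year 4 = 0 ∧ PySem.Int.mod year 100 ≠ 0) ∨ (PySem.Int.mod year 100 = 0 ∧ PySem.Int.mod year 400 = 0))) ∧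
     dict_2.contains month = true ∧ (1 ≤ day ∧ day ≤ (dict_1.get? month).getD 0) then
    let number := dict_1.items.foldl (fun number ab =>
      if ab.1 < month then number + ab.2 else if ab.1 = month then number + day else number) 0
    (true, number)
  else
    (false, 0)

-- ===== PORT B =====
def pvMDAYS : List Int := [31, 28, 31, 30, 31, 30, 31, 31, 30, 31, 30, 31]
def pvCUM : List Int := [0, 31, 59, 90, 120, 151, 181, 212, 243, 273, 304, 334]

def true_date_alt (year : Int) (month : Int) (day : Int) : Bool × Int :=
  let leap := PySem.Int.mod year 4 = 0 ∧ (PySem.Int.mod year 100 ≠ 0 ∨ PySem.Int.mod year 400 = 0)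
  if 1 ≤ month ∧ month ≤ 12 then
    -- _MDAYS[month-1] / _CUM[month-1]: the guard puts month-1 in range, so the total pyGetD is exact
    let limit := if leap ∧ month = 2 then 29 else PySem.List.pyGetD pvMDAYS (month - 1) 0
    if 1 ≤ day ∧ day ≤ limit then
      let extra : Int := if leap ∧ 2 < month then 1 else 0
      (true, PySem.List.pyGetD pvCUM (month - 1) 0 + extra + day)
    else (false, 0)
  else (false, 0)

-- ===== PRECONDITION & SPEC =====
def Spec_true_date (year : Int) (month : Int) (day : Int) (out : Bool × Int) : Prop := out = true_date_alt year month day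
instance (year : Int) (month : Int) (day : Int) (out : Bool × Int) : Decidable (Spec_true_date year month day out) := by unfold Spec_true_date; infer_instance

-- ===== CLAIM (what is proved, stated in full; the proofs are below) =====
def Claim_equal_true_date : Prop := ∀ (year : Int) (month : Int) (day : Int), Dom_true_date year month day → Spec_true_date year month day (true_date year month day)

-- ===== LEMMAS AND PROOFS =====

-- A's disjunctive leap-year test equals B's factored one
lemma pvLeap (y : Int) :
    ((PySem.Int.mod y 4 = 0 ∧ PySem.Int.mod y 100 ≠ 0) ∨ (PySem.Int.mod y 100 = 0 ∧ PySem.Int.mod y 400 = 0)) =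
    (PySem.Int.mod y 4 = 0 ∧ (PySem.Int.mod y 100 ≠ 0 ∨ PySem.Int.mod y 400 = 0)) := by
  apply propext
  rw [PySem.Int.mod_eq_emod_of_pos (a := y) (b := 4) (by norm_num),
      PySem.Int.mod_eq_emod_of_pos (a := y) (b := 100) (by norm_num),
      PySem.Int.mod_eq_emod_of_pos (a := y) (b := 400) (by norm_num)]
  omega

-- 'month in dict_2' is exactly 1 ≤ month ≤ 12
lemma pvC2 (m : Int) : ((PySem.Dict.ofList pvD2).contains m = true) = (1 ≤ m ∧ m ≤ 12) := by
  apply propext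
  rw [PySem.Dict.contains_iff_mem_keys,
      show (PySem.Dict.ofList pvD2) = PySem.Dict.mk pvD2 from rfl]
  simp [pvD2, PySem.Dict.keys]
  omega

lemma pvM12 (m : Int) (h : 1 ≤ m ∧ m ≤ 12) :
    m = 1 ∨ m = 2 ∨ m = 3 ∨ m = 4 ∨ m = 5 ∨ m = 6 ∨ m = 7 ∨ m = 8 ∨ m = 9 ∨ m = 10 ∨ m = 11 ∨ m = 12 := by omega

-- dict_1[month] is the plain month-length table entry
lemma pvG1 (m : Int) (h : 1 ≤ m ∧ m ≤ 12) :
    ((PySem.Dict.ofList pvD1).get? m).getD 0 = PySem.List.pyGetD pvMDAYS (m-1) 0 := by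
  rcases pvM12 m h with h' | h' | h' | h' | h' | h' | h' | h' | h' | h' | h' | h' <;> subst h' <;> rfl

-- dict_2[month] is the table entry, except 29 for February
lemma pvG2 (m : Int) (h : 1 ≤ m ∧ m ≤ 12) :
    ((PySem.Dict.ofList pvD2).get? m).getD 0 = (if m = 2 then 29 else PySem.List.pyGetD pvMDAYS (m-1) 0) := by
  rcases pvM12 m h with h' | h' | h' | h' | h' | h' | h' | h' | h' | h' | h' | h' <;> subst h' <;> rfl

-- A's accumulation loop over dict_1 is the prefix-sum table plus day
lemma pvF1 (m d : Int) (h : 1 ≤ m ∧ m ≤ 12) :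
    ((PySem.Dict.ofList pvD1).items.foldl (fun number ab =>
      if ab.1 < m then number + ab.2 else if ab.1 = m then number + d else number) 0) =
    PySem.List.pyGetD pvCUM (m-1) 0 + d := by
  rcases pvM12 m h with h' | h' | h' | h' | h' | h' | h' | h' | h' | h' | h' | h' <;> subst h' <;> rfl

-- A's accumulation loop over dict_2 is the prefix-sum table plus the leap offset plus day
lemma pvF2 (m d : Int) (h : 1 ≤ m ∧ m ≤ 12) :
    ((PySem.Dict.ofList pvD2).items.foldl (fun number ab =>
      if ab.1 < m then number + ab.2 else if ab.1 = m then number + d else number) 0) =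
    PySem.List.pyGetD pvCUM (m-1) 0 + (if 2 < m then 1 else 0) + d := by
  rcases pvM12 m h with h' | h' | h' | h' | h' | h' | h' | h' | h' | h' | h' | h' <;> subst h' <;> rfl

-- ===== VERDICT (by name: the statement is the Claim_ definition above) =====
theorem true_date_spec : Claim_equal_true_date := by
  intro year month day _
  unfold Spec_true_date true_date true_date_alt
  simp only [pvLeap, pvC2]
  by_cases hr : 1 ≤ month ∧ month ≤ 12
  · simp only [pvG1 month hr, pvG2 month hr, pvF1 month day hr, pvF2 month day hr,
      eq_true hr, true_and, if_true]
    by_cases hL : PySem.Int.mod year 4 = 0 ∧ (PySem.Int.mod year 100 ≠ 0 ∨ PySem.Int.mod year 400 = 0)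
    · simp only [eq_true hL, true_and, not_true, false_and, if_false]
    · simp only [eq_false hL, false_and, if_false, not_false_eq_true, true_and, add_zero]
  · simp only [eq_false hr, and_false, false_and, if_false]
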